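-- pv_equiv track=rewrite | github.com/woorud/96 | practice/구현/최고의 집합.py | solution
-- ===== SOURCE A (Python) =====
-- def solution(n, s):
--
--
--     if n > s:
--         return [-1]
--
--     res = []
--
--     for i in range(n):
--         res.append(s//n)
--
--     idx = n-1
--     for i in range(s%n):
--         res[idx] += 1
--         idx -= 1
--
--     return res
-- ===== SOURCE B (Python) =====
-- def solution(n, s):
--     if n > s:
--         return [-1]
--     res = []
--     while n > 0:
--         top = -(-s // n)          # largest element = ceil(remaining / count)
--         res.append(top)           # collected largest-first
--         s -= top
--         n -= 1
--     res.reverse()                 # ascending order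
--     return res
-- ===== Notes on version B (the rewrite author's own statement) =====
-- stated objective: alternative
-- what changed: Replaces A's fill-with-s//n pass plus backwards increment pass by a greedy loop that repeatedly takes the largest element as ceil(remaining_sum / remaining_count), subtracts it and appends it, then reverses once into ascending order; no divmod and no adjustment pass.
import Mathlib
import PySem

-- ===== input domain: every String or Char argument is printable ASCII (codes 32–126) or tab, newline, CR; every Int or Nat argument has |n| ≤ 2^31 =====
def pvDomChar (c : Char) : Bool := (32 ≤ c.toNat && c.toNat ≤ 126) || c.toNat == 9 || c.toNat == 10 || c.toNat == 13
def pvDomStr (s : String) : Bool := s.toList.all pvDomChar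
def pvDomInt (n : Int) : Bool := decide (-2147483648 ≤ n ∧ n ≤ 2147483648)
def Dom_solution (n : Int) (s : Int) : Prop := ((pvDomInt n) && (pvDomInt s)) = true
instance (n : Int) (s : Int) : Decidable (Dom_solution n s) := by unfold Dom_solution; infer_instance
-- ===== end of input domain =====

-- B builds the answer greedily back-to-front (each element = ceil of the remaining sum over the remaining count) instead of A's fill + backwards-increment passes; alternative decomposition, same cost.

-- ===== PORT A =====
-- res[idx] += 1 is ported with a Nat index p.2.toNat: exact here because idx ≥ 0 on every executed iteration (idx runs n-1 down to n - s%n, and the loop body only runs when 0 < s%n, hence n > 0).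
def solution (n : Int) (s : Int) : List Int :=
  if n > s then [-1]
  else
    let res := (PySem.List.pyRange 0 n 1).foldl (fun r _ => r ++ [PySem.Int.floordiv s n]) []
    ((PySem.List.pyRange 0 (PySem.Int.mod s n) 1).foldl
      (fun (p : List Int × Int) _ => (p.1.set p.2.toNat (p.1.getD p.2.toNat 0 + 1), p.2 - 1))
      (res, n - 1)).1

-- ===== PORT B =====
-- the while loop decrements n by 1 each iteration under guard n > 0, so it runs exactly n.toNat times: ported with fuel n.toNat
def solutionAltLoop : Nat → Int → Int → List Int → List Int
  | 0, _, _, res => res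
  | Nat.succ k, n, s, res =>
    let top := -(PySem.Int.floordiv (-s) n)
    solutionAltLoop k (n - 1) (s - top) (res ++ [top])

def solution_alt (n : Int) (s : Int) : List Int :=
  if n > s then [-1]
  else (solutionAltLoop n.toNat n s []).reverse

-- ===== PRECONDITION & SPEC =====
-- Pre_ excludes exactly n = 0 ∧ 0 ≤ s, where Python A raises ZeroDivisionError at s // n.
def Pre_solution (n : Int) (s : Int) : Prop := ¬ (n = 0 ∧ 0 ≤ s)
instance (n : Int) (s : Int) : Decidable (Pre_solution n s) := by unfold Pre_solution; infer_instance
def pvWitness_solution : Int × Int := (5, 12)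
def Spec_solution (n : Int) (s : Int) (out : List Int) : Prop := out = solution_alt n s
instance (n : Int) (s : Int) (out : List Int) : Decidable (Spec_solution n s out) := by unfold Spec_solution; infer_instance

-- ===== CLAIM (what is proved, stated in full; the proofs are below) =====
def Claim_equal_solution : Prop := ∀ (n : Int) (s : Int), Dom_solution n s → Pre_solution n s → Spec_solution n s (solution n s)

-- ===== LEMMAS AND PROOFS =====

-- A's fill loop appends the constant q once per range element
lemma fill_loop (q : Int) (xs : List Int) (init : List Int) :
    xs.foldl (fun r _ => r ++ [q]) init = init ++ List.replicate xs.length q := by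
  induction xs generalizing init with
  | nil => simp
  | cons x xs ih => simp [List.foldl_cons, ih, List.replicate_succ]

lemma set_replicate_last (a : Nat) (q v : Int) :
    (List.replicate (a + 1) q).set a v = List.replicate a q ++ [v] := by
  induction a with
  | zero => simp
  | succ a ih =>
    rw [List.replicate_succ (n := a + 1), List.set_cons_succ, ih,
      List.replicate_succ (n := a), List.cons_append]

lemma getD_replicate_append (a : Nat) (q : Int) (L : List Int) :
    ((List.replicate (a + 1) q ++ L).getD a 0) = q := by
  rw [List.getD_eq_getElem?_getD, List.getElem?_append_left (by simp),
    List.getElem?_replicate]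
  simp

-- A's increment loop turns the last b copies of q into q+1, one per step, walking the index down
lemma inc_loop (q : Int) (a b : Nat) :
    ((PySem.List.pyRange 0 (b : Int) 1).foldl
      (fun (p : List Int × Int) _ => (p.1.set p.2.toNat (p.1.getD p.2.toNat 0 + 1), p.2 - 1))
      (List.replicate (a + b) q, ((a : Int) + b) - 1))
    = (List.replicate a q ++ List.replicate b (q + 1), (a : Int) - 1) := by
  induction b generalizing a with
  | zero => simp [PySem.List.pyRange_one_eq_nil]
  | succ b ih =>
    have hb : ((b + 1 : Nat) : Int) = (b : Int) + 1 := by push_cast; ring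
    rw [hb, PySem.List.pyRange_one_succ_right (by positivity), List.foldl_append]
    have h1 : a + (b + 1) = (a + 1) + b := by omega
    have h2 : (a : Int) + ((b : Int) + 1) - 1 = ((a + 1 : Nat) : Int) + (b : Int) - 1 := by
      push_cast; ring
    rw [h1, h2, ih (a + 1)]
    simp only [List.foldl_cons, List.foldl_nil]
    have ht : (((a + 1 : Nat) : Int) - 1).toNat = a := by omega
    rw [ht, getD_replicate_append,
      List.set_append_left _ _ (by simp), set_replicate_last]
    push_cast
    simp [List.append_assoc]
    rw [← List.replicate_succ, List.replicate_succ']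

-- A's whole positive case: fill then increment equals the segment form
lemma a_pos (q r n : Int) (hn : 0 < n) (hr0 : 0 ≤ r) (hrn : r < n) :
    ((PySem.List.pyRange 0 r 1).foldl
      (fun (p : List Int × Int) _ => (p.1.set p.2.toNat (p.1.getD p.2.toNat 0 + 1), p.2 - 1))
      (List.replicate (PySem.List.pyRange 0 n 1).length q, n - 1)).1
    = List.replicate (n - r).toNat q ++ List.replicate r.toNat (q + 1) := by
  obtain ⟨b, rfl⟩ : ∃ b : Nat, r = (b : Int) := ⟨r.toNat, by omega⟩
  simp only [Int.toNat_natCast]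
  rw [PySem.List.length_pyRange_one,
    show (n - 0).toNat = (n - (b : Int)).toNat + b by omega,
    show n - 1 = (((n - (b : Int)).toNat : Nat) : Int) + (b : Int) - 1 by omega,
    inc_loop]

-- B's greedy loop on m elements with remaining sum m*q + r (0 ≤ r < m) yields the same segments
lemma b_loop (m : Nat) : ∀ (q r : Int) (res : List Int), 0 ≤ r → r < (m : Int) →
    solutionAltLoop m (m : Int) ((m : Int) * q + r) res
      = res ++ List.replicate r.toNat (q + 1) ++ List.replicate (m - r.toNat) q := by
  induction m with
  | zero => intro q r res h0 h1; omega
  | succ m ih =>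
    intro q r res h0 h1
    simp only [solutionAltLoop]
    by_cases hr : r = 0
    · subst hr
      have htop : -(PySem.Int.floordiv (-(((m : Nat) + 1 : Int) * q + 0)) ((m : Nat) + 1)) = q := by
        rw [PySem.Int.neg_floordiv_neg_eq_iff_of_pos (by positivity)]
        constructor <;> nlinarith
      push_cast at htop ⊢
      rw [htop]
      cases m with
      | zero => simp [solutionAltLoop, List.replicate_succ]
      | succ k =>
        have hs : (((k + 1 : Nat) : Int) + 1) * q + 0 - q = ((k + 1 : Nat) : Int) * q + 0 := by push_cast; ring
        have hn : (((k + 1 : Nat) : Int) + 1) - 1 = ((k + 1 : Nat) : Int) := by push_cast; ring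
        rw [hs, hn, ih q 0 (res ++ [q]) le_rfl (by positivity)]
        simp [List.replicate_succ (n := k + 1), List.append_assoc]
    · have hr1 : 1 ≤ r := by omega
      have htop : -(PySem.Int.floordiv (-(((m : Nat) + 1 : Int) * q + r)) ((m : Nat) + 1)) = q + 1 := by
        rw [PySem.Int.neg_floordiv_neg_eq_iff_of_pos (by positivity)]
        push_cast at h1
        constructor <;> nlinarith
      push_cast at htop ⊢
      rw [htop]
      have hs : ((m : Int) + 1) * q + r - (q + 1) = (m : Int) * q + (r - 1) := by ring
      have hn : ((m : Int) + 1) - 1 = (m : Int) := by ring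
      rw [hs, hn, ih q (r - 1) (res ++ [q + 1]) (by omega) (by push_cast at h1 ⊢; omega)]
      have e1 : m - (r - 1).toNat = m + 1 - r.toNat := by push_cast at h1; omega
      have e2 : (r - 1).toNat + 1 = r.toNat := by omega
      rw [e1, ← e2, List.replicate_succ (n := (r - 1).toNat) (a := q + 1)]
      simp [List.append_assoc]

-- ===== VERDICT (by name: the statement is the Claim_ definition above) =====
theorem solution_spec : Claim_equal_solution := by
  intro n s _ hpre
  unfold Spec_solution solution solution_alt
  by_cases hns : n > s
  · simp [hns]
  · simp only [if_neg hns]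
    rcases lt_trichotomy n 0 with hn | hn | hn
    · -- n < 0: A's loops do nothing (range(n) and range(s%n) are empty), B's fuel n.toNat is 0
      have hr := PySem.Int.mod_neg_bounds (a := s) (b := n) hn
      rw [PySem.List.pyRange_one_eq_nil (by omega), PySem.List.pyRange_one_eq_nil (by omega),
        show n.toNat = 0 by omega]
      simp [solutionAltLoop]
    · exact absurd ⟨hn, by omega⟩ hpre
    · -- n > 0
      have hr0 : 0 ≤ PySem.Int.mod s n := PySem.Int.mod_nonneg (a := s) (b := n) hn
      have hrn : PySem.Int.mod s n < n := PySem.Int.mod_lt (a := s) (b := n) hn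
      rw [fill_loop, List.nil_append,
        a_pos _ _ _ hn hr0 hrn]
      have hm : ((n.toNat : Nat) : Int) = n := by omega
      have hs : s = n * PySem.Int.floordiv s n + PySem.Int.mod s n := by
        have h := PySem.Int.floordiv_mul_add_mod s n
        rw [mul_comm] at h; linarith
      have key := b_loop n.toNat (PySem.Int.floordiv s n) (PySem.Int.mod s n) [] hr0 (by omega)
      rw [hm, ← hs] at key
      rw [key]
      have : (n - PySem.Int.mod s n).toNat = n.toNat - (PySem.Int.mod s n).toNat := by omega
      simp [this, List.reverse_append]
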